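-- pv_equiv track=rewrite | github.com/python/cpython | Lib/email/utils.py | _iter_escaped_chars
-- ===== SOURCE A (Python) =====
-- def _iter_escaped_chars(addr):
--     pos = 0
--     escape = False
--     for pos, ch in enumerate(addr):
--         if escape:
--             yield (pos, '\\' + ch)
--             escape = False
--         elif ch == '\\':
--             escape = True
--         else:
--             yield (pos, ch)
--     if escape:
--         yield (pos, '\\')
-- ===== SOURCE B (Python) =====
-- def _iter_escaped_chars(addr):
--     i = 0
--     n = len(addr)
--     while i < n:
--         if addr[i] == '\\':
--             if i + 1 < n:
--                 yield (i + 1, '\\' + addr[i + 1])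
--                 i += 2
--             else:
--                 yield (i, '\\')
--                 i += 1
--         else:
--             yield (i, addr[i])
--             i += 1
-- ===== Notes on version B (the rewrite author's own statement) =====
-- stated objective: alternative
-- what changed: Replaced the enumerate loop with a carried escape-flag state machine by an index-driven while loop with look-ahead that consumes backslash pairs in one step (advance by 2), so no boolean state is carried.
import Mathlib
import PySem

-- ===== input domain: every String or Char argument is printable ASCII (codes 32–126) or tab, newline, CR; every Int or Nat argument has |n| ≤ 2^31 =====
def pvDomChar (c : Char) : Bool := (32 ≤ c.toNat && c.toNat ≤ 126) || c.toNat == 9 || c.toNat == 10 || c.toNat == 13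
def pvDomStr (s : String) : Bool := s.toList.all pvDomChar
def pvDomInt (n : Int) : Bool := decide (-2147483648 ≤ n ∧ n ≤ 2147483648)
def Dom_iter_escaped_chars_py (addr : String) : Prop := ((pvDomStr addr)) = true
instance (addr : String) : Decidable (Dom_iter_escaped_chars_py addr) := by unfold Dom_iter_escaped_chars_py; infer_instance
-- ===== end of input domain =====

-- B replaces A's enumerate+escape-flag state machine with an index-driven loop with look-ahead (advance by 2 on a backslash pair); same cost, different decomposition.

-- ===== PORT A =====
-- fold state: (pos, escape, yielded-so-far), exactly A's loop variables
def pvStepA (s : Int × Bool × List (Int × String)) (p : Int × Char) : Int × Bool × List (Int × String) :=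
  if s.2.1 then (p.1, false, s.2.2 ++ [(p.1, "\\" ++ String.singleton p.2)])
  else if p.2 = '\\' then (p.1, true, s.2.2)
  else (p.1, false, s.2.2 ++ [(p.1, String.singleton p.2)])

def iter_escaped_chars_py (addr : String) : List (Int × String) :=
  let st := (PySem.List.enumerate addr.toList).foldl pvStepA ((0 : Int), false, ([] : List (Int × String)))
  if st.2.1 then st.2.2 ++ [(st.1, "\\")] else st.2.2

-- ===== PORT B =====
-- the while loop of Source B: i is the current index, look-ahead on a backslash
def pvAltGo (i : Int) : List Char → List (Int × String)
  | [] => []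
  | c :: rest =>
      if c = '\\' then
        match rest with
        | [] => [(i, "\\")]
        | d :: rest' => (i + 1, "\\" ++ String.singleton d) :: pvAltGo (i + 2) rest'
      else (i, String.singleton c) :: pvAltGo (i + 1) rest

def iter_escaped_chars_py_alt (addr : String) : List (Int × String) := pvAltGo 0 addr.toList

-- ===== PRECONDITION & SPEC =====
def Spec_iter_escaped_chars_py (addr : String) (out : List (Int × String)) : Prop := out = iter_escaped_chars_py_alt addr
instance (addr : String) (out : List (Int × String)) : Decidable (Spec_iter_escaped_chars_py addr out) := by unfold Spec_iter_escaped_chars_py; infer_instance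

-- ===== CLAIM =====
def Claim_equal_iter_escaped_chars_py : Prop := ∀ (addr : String), Dom_iter_escaped_chars_py addr → Spec_iter_escaped_chars_py addr (iter_escaped_chars_py addr)

-- ===== LEMMAS AND PROOFS =====
def pvFin (st : Int × Bool × List (Int × String)) : List (Int × String) :=
  if st.2.1 then st.2.2 ++ [(st.1, "\\")] else st.2.2

theorem pvMain (i : Int) (cs : List Char) : ∀ (p : Int) (acc : List (Int × String)),
    pvFin ((PySem.List.enumerate cs i).foldl pvStepA (p, false, acc)) = acc ++ pvAltGo i cs := by
  induction i, cs using pvAltGo.induct with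
  | case1 i => intro p acc; simp [PySem.List.enumerate_nil, pvFin, pvAltGo]
  | case2 i =>
      intro p acc
      simp [PySem.List.enumerate_cons, PySem.List.enumerate_nil, pvStepA, pvFin, pvAltGo]
  | case3 i d rest' ih =>
      intro p acc
      have e : i + 1 + 1 = i + 2 := by ring
      have hstep : (PySem.List.enumerate ('\\' :: d :: rest') i).foldl pvStepA (p, false, acc)
          = (PySem.List.enumerate rest' (i + 2)).foldl pvStepA
              (i + 1, false, acc ++ [(i + 1, "\\" ++ String.singleton d)]) := by
        simp [PySem.List.enumerate_cons, pvStepA, e]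
      rw [hstep, ih]
      have h3 : pvAltGo i ('\\' :: d :: rest') = (i + 1, "\\" ++ String.singleton d) :: pvAltGo (i + 2) rest' := by
        rw [pvAltGo.eq_def]; simp
      rw [h3]; simp
  | case4 i c rest hc ih =>
      intro p acc
      simp only [PySem.List.enumerate_cons, List.foldl_cons, pvStepA]
      rw [if_neg (by simp), if_neg hc]
      simp only [ih]
      have h2 : pvAltGo i (c :: rest) = (i, String.singleton c) :: pvAltGo (i + 1) rest := by
        rw [pvAltGo.eq_def]; simp [hc]
      rw [h2]; simp

-- ===== VERDICT =====
theorem iter_escaped_chars_py_spec : Claim_equal_iter_escaped_chars_py := by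
  intro addr _
  show iter_escaped_chars_py addr = iter_escaped_chars_py_alt addr
  unfold iter_escaped_chars_py iter_escaped_chars_py_alt
  simpa [pvFin] using pvMain 0 addr.toList 0 []
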